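-- pv_equiv track=rewrite | github.com/DanielBal05/spectra-ai | main.py | pick_latest_medicion
-- ===== SOURCE A (Python) =====
-- def pick_latest_medicion(mediciones: dict):
--     latest = None
--     latest_ts = ""
--     for _id, item in (mediciones or {}).items():
--         if not isinstance(item, dict):
--             continue
--         ts = str(item.get("timestamp", "") or "")
--         if ts > latest_ts:
--             latest_ts = ts
--             latest = {"id": _id, **item}
--     return latest
-- ===== SOURCE B (Python) =====
-- def pick_latest_medicion(mediciones: dict):
--     candidates = [
--         (_id, item)
--         for _id, item in (mediciones or {}).items()
--         if isinstance(item, dict) and str(item.get("timestamp", "") or "")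
--     ]
--     ordered = sorted(
--         candidates,
--         key=lambda p: str(p[1].get("timestamp", "") or ""),
--         reverse=True,
--     )
--     if not ordered:
--         return None
--     _id, item = ordered[0]
--     return {"id": _id, **item}
-- ===== Notes on version B (the rewrite author's own statement) =====
-- stated objective: alternative
-- what changed: Replaces the single running-max scan with building the list of candidates that have a non-empty timestamp, stable-sorting it by timestamp in descending order, and taking the first element.
import Mathlib
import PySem

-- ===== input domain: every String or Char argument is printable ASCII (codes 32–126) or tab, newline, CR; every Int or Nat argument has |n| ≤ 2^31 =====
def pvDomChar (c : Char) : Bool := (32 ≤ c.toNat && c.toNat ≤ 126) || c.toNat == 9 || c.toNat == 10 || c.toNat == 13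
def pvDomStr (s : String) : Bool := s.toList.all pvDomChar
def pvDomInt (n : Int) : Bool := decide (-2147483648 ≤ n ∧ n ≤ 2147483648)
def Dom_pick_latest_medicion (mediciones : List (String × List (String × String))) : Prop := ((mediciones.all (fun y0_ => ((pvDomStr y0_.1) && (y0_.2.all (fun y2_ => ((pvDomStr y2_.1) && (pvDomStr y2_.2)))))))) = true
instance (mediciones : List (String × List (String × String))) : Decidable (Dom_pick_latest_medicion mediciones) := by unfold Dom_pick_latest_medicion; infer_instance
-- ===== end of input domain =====

-- B replaces A's single running-max scan by filter + stable descending sort + head; objective: alternative (same result, not faster).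

-- ===== PORT A =====
-- ts = str(item.get("timestamp", "") or ""): values are strings, so this is the dict lookup with default "" ('or ""' maps "" to "")
def pvTs (item : List (String × String)) : String :=
  (PySem.Dict.ofList item).getD "timestamp" ""

-- {"id": _id, **item}
def pvRec (id : String) (item : List (String × String)) : List (String × String) :=
  ((PySem.Dict.ofList [("id", id)]).update (PySem.Dict.ofList item).items).items

-- literal port of A's loop: state (latest, latest_ts); 'isinstance(item, dict)' is always true under the type convention
def pick_latest_medicion (mediciones : List (String × List (String × String))) : Option (List (String × String)) :=
  ((PySem.Dict.ofList mediciones).items.foldl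
    (fun st p =>
      let ts := pvTs p.2
      if st.2 < ts then (some (pvRec p.1 p.2), ts) else st)
    ((none : Option (List (String × String))), "")).1

-- ===== PORT B =====
def pick_latest_medicion_alt (mediciones : List (String × List (String × String))) : Option (List (String × String)) :=
  let candidates := (PySem.Dict.ofList mediciones).items.filter (fun p => pvTs p.2 != "")
  match PySem.List.sorted candidates (fun p => pvTs p.2) true with
  | [] => none
  | p :: _ => some (pvRec p.1 p.2)

-- ===== PRECONDITION & SPEC =====
def Spec_pick_latest_medicion (mediciones : List (String × List (String × String))) (out : Option (List (String × String))) : Prop := out = pick_latest_medicion_alt mediciones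
instance (mediciones : List (String × List (String × String))) (out : Option (List (String × String))) : Decidable (Spec_pick_latest_medicion mediciones out) := by unfold Spec_pick_latest_medicion; infer_instance

-- ===== CLAIM (what is proved, stated in full; the proofs are below) =====
def Claim_equal_pick_latest_medicion : Prop := ∀ (mediciones : List (String × List (String × String))), Dom_pick_latest_medicion mediciones → Spec_pick_latest_medicion mediciones (pick_latest_medicion mediciones)

-- ===== LEMMAS AND PROOFS =====

theorem str_not_lt_empty (s : String) : ¬ s < "" := by
  simp [String.lt_iff_toList_lt]

theorem str_empty_lt (s : String) (h : s ≠ "") : "" < s := by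
  rw [String.lt_iff_toList_lt]
  have hl : s.toList ≠ [] := by simpa using h
  cases he : s.toList with
  | nil => exact absurd he hl
  | cons a l => simp [List.nil_lt_cons a l]

-- invariant: A's state corresponds to the head of B's descending-sorted accumulator
theorem loop_eq_insert_head :
    ∀ (l : List (String × List (String × String)))
      (st : Option (List (String × String)) × String)
      (acc : List (String × List (String × String))),
      ((st = (none, "") ∧ acc = []) ∨
        (∃ m t, acc = m :: t ∧ st = (some (pvRec m.1 m.2), pvTs m.2))) →
      (l.foldl
        (fun st p =>
          let ts := pvTs p.2
          if st.2 < ts then (some (pvRec p.1 p.2), ts) else st) st).1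
      = (match (l.filter (fun p => pvTs p.2 != "")).foldl
            (fun acc x => PySem.List.insertBy (fun a b => decide (pvTs b.2 < pvTs a.2)) x acc) acc with
         | [] => none
         | m :: _ => some (pvRec m.1 m.2)) := by
  intro l
  induction l with
  | nil =>
    intro st acc h
    rcases h with ⟨hst, hacc⟩ | ⟨m, t, hacc, hst⟩ <;> subst hacc <;> subst hst <;> simp
  | cons x l ih =>
    intro st acc h
    by_cases hts : pvTs x.2 = ""
    · simp only [List.foldl_cons, List.filter_cons, hts]
      rw [if_neg (str_not_lt_empty st.2), if_neg (by simp)]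
      exact ih st acc h
    · have hkeep : (pvTs x.2 != "") = true := by simpa using hts
      simp only [List.foldl_cons, List.filter_cons, hkeep, if_pos]
      rcases h with ⟨hst, hacc⟩ | ⟨m, t, hacc, hst⟩
      · subst hst; subst hacc
        rw [if_pos (str_empty_lt _ hts)]
        exact ih _ _ (Or.inr ⟨x, [], by simp [PySem.List.insertBy], rfl⟩)
      · subst hst; subst hacc
        by_cases hlt : pvTs m.2 < pvTs x.2
        · rw [if_pos hlt]
          exact ih _ _ (Or.inr ⟨x, m :: t, by simp [PySem.List.insertBy, hlt], rfl⟩)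
        · rw [if_neg hlt]
          exact ih _ _ (Or.inr ⟨m, PySem.List.insertBy (fun a b => decide (pvTs b.2 < pvTs a.2)) x t,
            by simp [PySem.List.insertBy, hlt], rfl⟩)

-- ===== VERDICT (by name: the statement is the Claim_ definition above) =====
theorem pick_latest_medicion_spec : Claim_equal_pick_latest_medicion := by
  intro mediciones _
  simp only [Spec_pick_latest_medicion, pick_latest_medicion, pick_latest_medicion_alt,
    PySem.List.sorted_rev_eq_foldl_insertBy]
  exact loop_eq_insert_head _ _ _ (Or.inl ⟨rfl, rfl⟩)
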